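-- pv_equiv track=rewrite | github.com/mggg/VoteKit | src/votekit/ballot_generator/bloc_slate_generator/cambridge.py | _reduce_ballot
-- ===== SOURCE A (Python) =====
-- def _reduce_ballot(original_slate_ballot: str, w_count: int, c_count: int):
--     """
--     Takes a long ballot and reduces it to match the number of candidates in the config.
--
--     Args:
--         original_slate_ballot (str): The original ballot to reduce. Slate type.
--         w_count (int): The number of candidates in the majority bloc.
--         c_count (int): The number of candidates in the minority bloc.
--
--     Returns:
--         str: The reduced ballot.
--     """
--     new_ballot = ""
--     for char in original_slate_ballot:
--         if char == "W" and w_count > 0: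
--             new_ballot += "W"
--             w_count -= 1
--         elif char == "C" and c_count > 0:
--             new_ballot += "C"
--             c_count -= 1
--     return new_ballot
-- ===== SOURCE B (Python) =====
-- def _reduce_ballot(original_slate_ballot: str, w_count: int, c_count: int):
--     """Stateless re-implementation: a character is kept iff it is a 'W' ('C')
--     whose number of earlier 'W's ('C's) is still below w_count (c_count)."""
--     s = original_slate_ballot
--
--     def keep(i, ch):
--         if ch == "W":
--             return s.count("W", 0, i) < w_count
--         if ch == "C":
--             return s.count("C", 0, i) < c_count
--         return False
--
--     return "".join(ch for i, ch in enumerate(s) if keep(i, ch))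
-- ===== Notes on version B (the rewrite author's own statement) =====
-- stated objective: alternative
-- what changed: Replaces A's single stateful pass with mutable decrementing counters by a stateless filter: each position is kept iff the count of its letter in the strict prefix is still below the corresponding quota, computed per position.
import Mathlib
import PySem

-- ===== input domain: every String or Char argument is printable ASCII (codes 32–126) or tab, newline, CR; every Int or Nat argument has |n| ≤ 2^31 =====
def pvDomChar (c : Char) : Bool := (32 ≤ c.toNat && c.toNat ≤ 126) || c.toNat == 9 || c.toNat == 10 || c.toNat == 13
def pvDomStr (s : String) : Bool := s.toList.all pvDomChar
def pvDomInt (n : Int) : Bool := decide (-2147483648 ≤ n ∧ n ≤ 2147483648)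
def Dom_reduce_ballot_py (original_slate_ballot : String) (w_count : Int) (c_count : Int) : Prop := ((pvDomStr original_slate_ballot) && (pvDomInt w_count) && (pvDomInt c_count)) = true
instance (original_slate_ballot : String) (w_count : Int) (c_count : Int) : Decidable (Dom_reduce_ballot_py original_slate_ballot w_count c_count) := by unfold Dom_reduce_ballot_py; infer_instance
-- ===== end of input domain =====

-- B replaces A's single stateful pass (mutable decrementing counters) by a stateless
-- per-position filter based on prefix letter counts; objective: alternative (not faster).

-- ===== PORT A =====
-- the for-loop with mutable (new_ballot, w_count, c_count) becomes a foldl over that state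
def reduce_ballot_py (original_slate_ballot : String) (w_count : Int) (c_count : Int) : String :=
  let r := original_slate_ballot.toList.foldl
    (fun (st : List Char × Int × Int) ch =>
      if ch = 'W' ∧ st.2.1 > 0 then (st.1 ++ ['W'], st.2.1 - 1, st.2.2)
      else if ch = 'C' ∧ st.2.2 > 0 then (st.1 ++ ['C'], st.2.1, st.2.2 - 1)
      else st)
    ([], w_count, c_count)
  String.mk r.1

-- ===== PORT B =====
-- helper `keep`: s.count('W', 0, i) is exactly (s.toList.take i).count 'W' for 0 ≤ i
def pvKeep (l : List Char) (w_count c_count : Int) (i : Int) (ch : Char) : Bool :=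
  if ch = 'W' then decide (((l.take i.toNat).count 'W' : Int) < w_count)
  else if ch = 'C' then decide (((l.take i.toNat).count 'C' : Int) < c_count)
  else false

-- "".join(ch for i, ch in enumerate(s) if keep(i, ch))
def reduce_ballot_py_alt (original_slate_ballot : String) (w_count : Int) (c_count : Int) : String :=
  let l := original_slate_ballot.toList
  String.mk (((PySem.List.enumerate l 0).filter
    (fun p => pvKeep l w_count c_count p.1 p.2)).map (·.2))

-- ===== PRECONDITION & SPEC =====
def Spec_reduce_ballot_py (original_slate_ballot : String) (w_count : Int) (c_count : Int) (out : String) : Prop := out = reduce_ballot_py_alt original_slate_ballot w_count c_count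
instance (original_slate_ballot : String) (w_count : Int) (c_count : Int) (out : String) : Decidable (Spec_reduce_ballot_py original_slate_ballot w_count c_count out) := by unfold Spec_reduce_ballot_py; infer_instance

-- ===== CLAIM (what is proved, stated in full; the proofs are below) =====
def Claim_equal_reduce_ballot_py : Prop := ∀ (original_slate_ballot : String) (w_count : Int) (c_count : Int), Dom_reduce_ballot_py original_slate_ballot w_count c_count → Spec_reduce_ballot_py original_slate_ballot w_count c_count (reduce_ballot_py original_slate_ballot w_count c_count)

-- ===== LEMMAS AND PROOFS =====

-- common recursive characterisation of the kept characters
def pvSpecF : List Char → Int → Int → List Char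
  | [], _, _ => []
  | ch :: r, w, c =>
    if ch = 'W' ∧ w > 0 then 'W' :: pvSpecF r (w - 1) c
    else if ch = 'C' ∧ c > 0 then 'C' :: pvSpecF r w (c - 1)
    else pvSpecF r w c

theorem pvSpecF_nonposW : ∀ (l : List Char) (c w w' : Int), w ≤ 0 → w' ≤ 0 →
    pvSpecF l w c = pvSpecF l w' c := by
  intro l
  induction l with
  | nil => intro _ _ _ _ _; rfl
  | cons x r ih =>
    intro c w w' hw hw'
    simp only [pvSpecF]
    rw [if_neg (α := List Char) (c := x = 'W' ∧ w > 0) (fun h => absurd h.2 (by omega)),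
        if_neg (α := List Char) (c := x = 'W' ∧ w' > 0) (fun h => absurd h.2 (by omega))]
    by_cases hC : x = 'C' ∧ c > 0
    · rw [if_pos hC, if_pos hC]
      exact congrArg _ (ih (c - 1) w w' hw hw')
    · rw [if_neg hC, if_neg hC]
      exact ih c w w' hw hw'

theorem pvSpecF_nonposC : ∀ (l : List Char) (w c c' : Int), c ≤ 0 → c' ≤ 0 →
    pvSpecF l w c = pvSpecF l w c' := by
  intro l
  induction l with
  | nil => intro _ _ _ _ _; rfl
  | cons x r ih =>
    intro w c c' hc hc'
    simp only [pvSpecF]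
    rw [if_neg (α := List Char) (c := x = 'C' ∧ c > 0) (fun h => absurd h.2 (by omega)),
        if_neg (α := List Char) (c := x = 'C' ∧ c' > 0) (fun h => absurd h.2 (by omega))]
    by_cases hW : x = 'W' ∧ w > 0
    · rw [if_pos hW, if_pos hW]
      exact congrArg _ (ih (w - 1) c c' hc hc')
    · rw [if_neg hW, if_neg hW]
      exact ih w c c' hc hc'

-- A's fold equals the accumulator followed by pvSpecF
theorem pvFoldA : ∀ (l : List Char) (nb : List Char) (w c : Int),
    (l.foldl (fun (st : List Char × Int × Int) ch =>
      if ch = 'W' ∧ st.2.1 > 0 then (st.1 ++ ['W'], st.2.1 - 1, st.2.2)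
      else if ch = 'C' ∧ st.2.2 > 0 then (st.1 ++ ['C'], st.2.1, st.2.2 - 1)
      else st) (nb, w, c)).1 = nb ++ pvSpecF l w c := by
  intro l
  induction l with
  | nil => intro nb w c; simp [pvSpecF]
  | cons x r ih =>
    intro nb w c
    simp only [List.foldl_cons, pvSpecF]
    by_cases h1 : x = 'W' ∧ w > 0
    · simp [h1, ih]
    · by_cases h2 : x = 'C' ∧ c > 0
      · simp [h2, ih]
      · simp [h1, h2, ih]

-- B's filter, generalised over an already-consumed prefix `pre`
theorem pvFoldB : ∀ (l pre : List Char) (w c : Int),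
    ((PySem.List.enumerate l (pre.length : Int)).filter
      (fun p => pvKeep (pre ++ l) w c p.1 p.2)).map (·.2)
    = pvSpecF l (w - pre.count 'W') (c - pre.count 'C') := by
  intro l
  induction l with
  | nil => intro pre w c; simp [PySem.List.enumerate_nil, pvSpecF]
  | cons x r ih =>
    intro pre w c
    have hassoc : pre ++ x :: r = (pre ++ [x]) ++ r := by simp
    have hlen : (pre.length : Int) + 1 = (((pre ++ [x]).length : Nat) : Int) := by
      simp
    rw [PySem.List.enumerate_cons, List.filter_cons]
    by_cases hxW : x = 'W'
    · have cW : (pre ++ [x]).count 'W' = pre.count 'W' + 1 := by simp [hxW]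
      have cC : (pre ++ [x]).count 'C' = pre.count 'C' := by simp [hxW]
      by_cases hw : (pre.count 'W' : Int) < w
      · have hkeep : pvKeep (pre ++ x :: r) w c (pre.length : Int) x = true := by
          simp [pvKeep, hxW, hw]
        rw [hkeep, if_pos rfl, List.map_cons, hassoc, hlen, ih (pre ++ [x]) w c, cW, cC]
        have e : w - ((pre.count 'W' + 1 : Nat) : Int) = w - pre.count 'W' - 1 := by
          push_cast; ring
        rw [e]
        simp only [pvSpecF]
        rw [if_pos ⟨hxW, by omega⟩, hxW]
      · have hkeep : pvKeep (pre ++ x :: r) w c (pre.length : Int) x = false := by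
          simp [pvKeep, hxW]; omega
        rw [hkeep, if_neg (by simp), hassoc, hlen, ih (pre ++ [x]) w c, cW, cC]
        simp only [pvSpecF]
        rw [if_neg (fun h => hw (by omega)),
            if_neg (fun h => absurd (hxW ▸ h.1) (by decide))]
        exact pvSpecF_nonposW r (c - pre.count 'C') _ _ (by push_cast; omega) (by omega)
    · by_cases hxC : x = 'C'
      · have cW : (pre ++ [x]).count 'W' = pre.count 'W' := by simp [hxC]
        have cC : (pre ++ [x]).count 'C' = pre.count 'C' + 1 := by simp [hxC]
        by_cases hc : (pre.count 'C' : Int) < c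
        · have hkeep : pvKeep (pre ++ x :: r) w c (pre.length : Int) x = true := by
            simp [pvKeep, hxC, hc]
          rw [hkeep, if_pos rfl, List.map_cons, hassoc, hlen, ih (pre ++ [x]) w c, cW, cC]
          have e : c - ((pre.count 'C' + 1 : Nat) : Int) = c - pre.count 'C' - 1 := by
            push_cast; ring
          rw [e]
          simp only [pvSpecF]
          rw [if_neg (fun h => hxW h.1), if_pos ⟨hxC, by omega⟩, hxC]
        · have hkeep : pvKeep (pre ++ x :: r) w c (pre.length : Int) x = false := by
            simp [pvKeep, hxC]; omega
          rw [hkeep, if_neg (by simp), hassoc, hlen, ih (pre ++ [x]) w c, cW, cC]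
          simp only [pvSpecF]
          rw [if_neg (fun h => hxW h.1), if_neg (fun h => hc (by omega))]
          exact pvSpecF_nonposC r (w - pre.count 'W') _ _ (by push_cast; omega) (by omega)
      · have cW : (pre ++ [x]).count 'W' = pre.count 'W' := by simp [hxW]
        have cC : (pre ++ [x]).count 'C' = pre.count 'C' := by simp [hxC]
        have hkeep : pvKeep (pre ++ x :: r) w c (pre.length : Int) x = false := by
          simp [pvKeep, hxW, hxC]
        rw [hkeep, if_neg (by simp), hassoc, hlen, ih (pre ++ [x]) w c, cW, cC]
        simp only [pvSpecF]
        rw [if_neg (fun h => hxW h.1), if_neg (fun h => hxC h.1)]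

-- ===== VERDICT (by name: the statement is the Claim_ definition above) =====
theorem reduce_ballot_py_spec : Claim_equal_reduce_ballot_py := by
  intro s w c _
  unfold Spec_reduce_ballot_py reduce_ballot_py reduce_ballot_py_alt
  have hA := pvFoldA s.toList [] w c
  have hB := pvFoldB s.toList [] w c
  simp only [List.length_nil, Nat.cast_zero, List.nil_append, List.count_nil, sub_zero] at hB
  simp only [hA, List.nil_append, hB]
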